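-- pv_equiv track=rewrite | github.com/cadyshock/Createproject | FOUD Restaurant Manager.py | tablen
-- ===== SOURCE A (Python) =====
-- def tablen(x,y):
--     test=[]
--     counter=[]
--     for i in x:
--         test.append(i)
--         if len(i)>=y and i[0]=='O':
--             counter.append(test.index(i)+1)
--             test.insert(test.index(i), ' ')
--             test.remove(i)
--     return counter
-- ===== SOURCE B (Python) =====
-- def tablen(x, y):
--     # Each qualifying value's earlier occurrences also qualified and consumed themselves in
--     # order, so the earliest unconsumed occurrence is always the current element itself:
--     # the whole shadow-list bookkeeping collapses to a comprehension.
--     return [idx + 1 for idx, s in enumerate(x) if len(s) >= y and s.startswith('O')]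
-- ===== Notes on version B (the rewrite author's own statement) =====
-- stated objective: simpler
-- what changed: Replaces A's shadow `test` list with its per-hit list.index/insert/remove bookkeeping by a one-line enumerate comprehension: every earlier occurrence of a qualifying value also qualified and consumed itself, so each qualifying element records its own 1-based position.
import Mathlib
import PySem

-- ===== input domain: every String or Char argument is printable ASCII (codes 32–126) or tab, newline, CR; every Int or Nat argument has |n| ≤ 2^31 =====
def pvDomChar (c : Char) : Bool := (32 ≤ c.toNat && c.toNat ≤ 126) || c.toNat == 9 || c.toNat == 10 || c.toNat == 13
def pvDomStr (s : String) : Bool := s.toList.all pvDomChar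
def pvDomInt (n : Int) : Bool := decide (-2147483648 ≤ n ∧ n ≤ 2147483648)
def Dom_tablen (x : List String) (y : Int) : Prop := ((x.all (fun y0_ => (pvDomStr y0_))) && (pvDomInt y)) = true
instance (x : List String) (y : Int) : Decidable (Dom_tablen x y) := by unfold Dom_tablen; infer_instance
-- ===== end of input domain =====

-- B replaces A's shadow-list bookkeeping (list.index / insert / remove per hit) by a single
-- comprehension: every earlier occurrence of a qualifying value also qualified and consumed
-- itself, so each hit records its own position; objective: simpler (one line, no shadow list).

-- ===== PORT A =====
def tablenStepA (y : Int) (st : List String × List Int) (i : String) : List String × List Int :=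
  let test := st.1 ++ [i]                                     -- test.append(i)
  if y ≤ PySem.Str.len i ∧ PySem.Str.pyGet? i 0 = some 'O' then   -- len(i)>=y and i[0]=='O'
    match PySem.List.index? test i with                       -- test.index(i)  (i ∈ test: just appended)
    | some k =>
        let counter := st.2 ++ [(k : Int) + 1]                -- counter.append(test.index(i)+1)
        let test1 := PySem.List.insert test (k : Int) " "     -- test.insert(test.index(i), ' ')
        match PySem.List.remove? test1 i with                 -- test.remove(i)
        | some test2 => (test2, counter)
        | none => (test1, counter)                            -- unreachable: i ∈ test1
    | none => (test, st.2)                                    -- unreachable: i ∈ test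
  else (test, st.2)

def tablen (x : List String) (y : Int) : List Int :=
  (x.foldl (tablenStepA y) ([], [])).2

-- ===== PORT B =====
def tablen_alt (x : List String) (y : Int) : List Int :=
  ((PySem.List.enumerate x 0).filter
      (fun q => decide (y ≤ PySem.Str.len q.2 ∧ PySem.Str.startswith q.2 "O" = true))).map
    (fun q => q.1 + 1)

-- ===== PRECONDITION & SPEC =====
-- Pre_ excludes exactly the inputs on which A raises IndexError: an empty string in x while
-- y ≤ 0 makes A evaluate ''[0].
def Pre_tablen (x : List String) (y : Int) : Prop := y ≤ 0 → ¬ ("" ∈ x)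
instance (x : List String) (y : Int) : Decidable (Pre_tablen x y) := by unfold Pre_tablen; infer_instance
def pvWitness_tablen : List String × Int := (["Okay", "no", "Okay", "O"], 2)

def Spec_tablen (x : List String) (y : Int) (out : List Int) : Prop := out = tablen_alt x y
instance (x : List String) (y : Int) (out : List Int) : Decidable (Spec_tablen x y out) := by unfold Spec_tablen; infer_instance

-- ===== CLAIM (what is proved, stated in full; the proofs are below) =====
def Claim_equal_tablen : Prop := ∀ (x : List String) (y : Int), Dom_tablen x y → Pre_tablen x y → Spec_tablen x y (tablen x y)

-- ===== LEMMAS AND PROOFS =====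

-- the qualification test, shared by both programs on nonempty strings
def pvQual (y : Int) (s : String) : Prop :=
  y ≤ PySem.Str.len s ∧ PySem.Str.startswith s "O" = true

-- A's test `i[0]=='O'` agrees with B's `i.startswith('O')` on every string
-- (both are false on "", where the real Python A raises — excluded by Pre_)
lemma condA_iff (y : Int) (s : String) :
    (y ≤ PySem.Str.len s ∧ PySem.Str.pyGet? s 0 = some 'O') ↔ pvQual y s := by
  unfold pvQual
  have h0 : PySem.Str.pyGet? s 0 = s.toList[0]? := by
    simp [PySem.Str.pyGet?, PySem.List.pyGet?_zero]
  have : PySem.Str.pyGet? s 0 = some 'O' ↔ PySem.Str.startswith s "O" = true := by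
    rw [h0, PySem.Str.startswith_eq, PySem.Chars.startswith_iff]
    have hO : ("O" : String).toList = ['O'] := rfl
    rw [hO]
    cases s.toList with
    | nil => simp
    | cons c t => simp [List.cons_prefix_cons, eq_comm]
  rw [this]

lemma pvQual_ne_space {y : Int} {s : String} (h : pvQual y s) : s ≠ " " := by
  rcases h with ⟨_, h2⟩
  intro hs; subst hs
  rw [PySem.Str.startswith_eq, PySem.Chars.startswith_iff] at h2
  simp at h2

-- A's test list, expressed as the input prefix with the first hd(s) occurrences of each s blanked
def maskL : List String → (String → Nat) → List String
  | [], _ => []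
  | a :: t, hd => (if 0 < hd a then " " else a) :: maskL t (fun s => if s = a then hd s - 1 else hd s)

-- position of the first unconsumed occurrence of i (= p.length if none)
def pick : List String → (String → Nat) → String → Nat
  | [], _, _ => 0
  | a :: t, hd, i => if a = i ∧ hd i = 0 then 0 else pick t (fun s => if s = a then hd s - 1 else hd s) i + 1

lemma maskL_append_zero (t : List String) (g : String → Nat) (i : String) (h : g i = 0) :
    maskL (t ++ [i]) g = maskL t g ++ [i] := by
  induction t generalizing g with
  | nil => simp [maskL, h]
  | cons a t ih =>
      simp only [List.cons_append, maskL]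
      congr 1
      apply ih
      by_cases hai : i = a
      · subst hai; simp; omega
      · simp [hai, h]

lemma index?_mask (p : List String) (hd : String → Nat) (i : String) (hi : i ≠ " ") :
    PySem.List.index? (maskL p hd ++ [i]) i = some (pick p hd i) := by
  induction p generalizing hd with
  | nil => simp [maskL, pick, PySem.List.index?_cons_self]
  | cons a t ih =>
      by_cases hc : a = i ∧ hd i = 0
      · have hm : (if 0 < hd a then " " else a) = i := by
          rcases hc with ⟨rfl, h0⟩; simp [h0]
        simp only [maskL, List.cons_append, hm, pick, if_pos hc]
        exact PySem.List.index?_cons_self _ _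
      · have hne : (if 0 < hd a then " " else a) ≠ i := by
          by_cases h0 : 0 < hd a
          · simpa [h0] using Ne.symm hi
          · have ha0 : hd a = 0 := by omega
            simp only [if_neg h0]
            intro hai; exact hc ⟨hai, hai ▸ ha0⟩
        simp only [maskL, List.cons_append]
        rw [PySem.List.index?_cons_of_ne _ hne, ih, pick, if_neg hc]
        rfl

lemma maskL_consume (p : List String) (hd : String → Nat) (i : String)
    (hc : hd i ≤ p.count i) :
    maskL (p ++ [i]) (fun s => if s = i then hd s + 1 else hd s) =
      (maskL p hd ++ [i]).set (pick p hd i) " " := by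
  induction p generalizing hd with
  | nil => simp [maskL, pick]
  | cons a t ih =>
      by_cases hcase : a = i ∧ hd i = 0
      · obtain ⟨rfl, h0⟩ := hcase
        rw [List.cons_append, pick, if_pos (⟨rfl, h0⟩ : a = a ∧ hd a = 0)]
        show (if 0 < (if a = a then hd a + 1 else hd a) then " " else a) ::
            maskL (t ++ [a]) (fun s => if s = a then (if s = a then hd s + 1 else hd s) - 1
              else (if s = a then hd s + 1 else hd s)) =
          ((if 0 < hd a then " " else a) ::
            (maskL t (fun s => if s = a then hd s - 1 else hd s) ++ [a])).set 0 " "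
        have hg : (fun s => if s = a then (if s = a then hd s + 1 else hd s) - 1 else
            (if s = a then hd s + 1 else hd s)) = (fun s => if s = a then hd s - 1 else hd s) := by
          funext s
          by_cases hs : s = a
          · subst hs; rw [if_pos rfl, if_pos rfl, if_pos rfl]; omega
          · rw [if_neg hs, if_neg hs, if_neg hs]
        have hz2 : (fun s => if s = a then hd s - 1 else hd s) a = 0 := by
          show (if a = a then hd a - 1 else hd a) = 0
          rw [if_pos rfl]
          omega
        rw [List.set_cons_zero, hg, maskL_append_zero t _ a hz2]
        congr 1
        have h1 : (if a = a then hd a + 1 else hd a) = hd a + 1 := if_pos rfl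
        rw [h1, if_pos (Nat.succ_pos _)]
      · rw [List.cons_append, pick, if_neg hcase]
        show (if 0 < (if a = i then hd a + 1 else hd a) then " " else a) ::
            maskL (t ++ [i]) (fun s => if s = a then (if s = i then hd s + 1 else hd s) - 1
              else (if s = i then hd s + 1 else hd s)) =
          ((if 0 < hd a then " " else a) ::
            (maskL t (fun s => if s = a then hd s - 1 else hd s) ++ [i])).set
            (pick t (fun s => if s = a then hd s - 1 else hd s) i + 1) " "
        have hfun : (fun s => if s = a then (if s = i then hd s + 1 else hd s) - 1 else
              (if s = i then hd s + 1 else hd s)) =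
              (fun s => if s = i then (fun u => if u = a then hd u - 1 else hd u) s + 1 else
                (fun u => if u = a then hd u - 1 else hd u) s) := by
            funext u
            beta_reduce
            by_cases hua : u = a
            · by_cases hui : u = i
              · subst hui
                subst hua
                have h0 : hd u ≠ 0 := fun hz => hcase ⟨rfl, hz⟩
                split_ifs <;> omega
              · subst hua
                split_ifs <;> omega
            · by_cases hui : u = i
              · subst hui
                split_ifs <;> omega
              · split_ifs <;> omega
        have hbound : (fun u => if u = a then hd u - 1 else hd u) i ≤ t.count i := by
          show (if i = a then hd i - 1 else hd i) ≤ t.count i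
          by_cases hai : i = a
          · subst hai
            rw [if_pos rfl]
            have h2 := hc
            simp [List.count_cons] at h2
            omega
          · rw [if_neg hai]
            have hia' : a ≠ i := fun h => hai h.symm
            have h2 := hc
            simp [List.count_cons, hia'] at h2
            omega
        rw [List.set_cons_succ, hfun, ih _ hbound]
        congr 1
        by_cases hai : a = i
        · subst hai
          have h0 : hd a ≠ 0 := fun h0 => hcase ⟨rfl, h0⟩
          rw [if_pos rfl, if_pos (by omega : 0 < hd a + 1), if_pos (by omega : 0 < hd a)]
        · rw [if_neg hai]

lemma set_pre (pre suf : List String) (v : String) :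
    (pre ++ v :: suf).set pre.length " " = pre ++ " " :: suf := by
  induction pre with
  | nil => simp
  | cons a t ih => simp [ih]

lemma remove_pre (pre suf : List String) (v : String) (hv : " " ≠ v) (hnp : v ∉ pre) :
    PySem.List.remove? (pre ++ " " :: v :: suf) v = some (pre ++ " " :: suf) := by
  induction pre with
  | nil =>
      simp only [List.nil_append]
      rw [PySem.List.remove?_cons_of_ne _ hv]
      simp [PySem.List.remove?_cons_self]
  | cons a t ih =>
      have ha : a ≠ v := fun h => hnp (h ▸ List.mem_cons_self)
      simp only [List.cons_append]
      rw [PySem.List.remove?_cons_of_ne _ ha, ih (fun h => hnp (List.mem_cons_of_mem _ h))]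
      rfl

lemma insert_remove (xs : List String) (v : String) (k : Nat) (hv : v ≠ " ")
    (h : PySem.List.index? xs v = some k) :
    PySem.List.remove? (PySem.List.insert xs (k : Int) " ") v = some (xs.set k " ") := by
  rw [PySem.List.index?_eq_some_iff] at h
  obtain ⟨pre, suf, rfl, hlen, hnp⟩ := h
  subst hlen
  rw [PySem.List.insert_natCast _ _ _ (by simp)]
  rw [List.take_left' rfl, List.drop_left' rfl]
  rw [set_pre]
  exact remove_pre pre suf v (Ne.symm hv) hnp

-- a qualifying element always consumes ITSELF: when all prior occurrences are already
-- consumed, the first unconsumed occurrence is the just-appended element at position p.length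
lemma pick_full (p : List String) (hd : String → Nat) (i : String) (h : p.count i ≤ hd i) :
    pick p hd i = p.length := by
  induction p generalizing hd with
  | nil => rfl
  | cons a t ih =>
      have hcase : ¬ (a = i ∧ hd i = 0) := by
        rintro ⟨rfl, h0⟩
        simp [List.count_cons, h0] at h
      rw [pick, if_neg hcase, List.length_cons]
      congr 1
      apply ih
      show t.count i ≤ (if i = a then hd i - 1 else hd i)
      by_cases hai : i = a
      · subst hai
        rw [if_pos rfl]
        have h2 := h
        simp [List.count_cons] at h2
        omega
      · rw [if_neg hai]
        have h2 := h
        simp [List.count_cons, hai] at h2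
        omega

-- consumed counts induced by A's loop: every occurrence of a qualifying value gets consumed
def hdQ (y : Int) (p : List String) : String → Nat :=
  fun s => if y ≤ PySem.Str.len s ∧ PySem.Str.startswith s "O" = true then p.count s else 0

lemma hdQ_append_qual (y : Int) (p : List String) (i : String)
    (hq : y ≤ PySem.Str.len i ∧ PySem.Str.startswith i "O" = true) :
    hdQ y (p ++ [i]) = (fun s => if s = i then hdQ y p s + 1 else hdQ y p s) := by
  funext s
  unfold hdQ
  by_cases hs : s = i
  · subst hs
    rw [if_pos hq, if_pos hq, if_pos rfl]
    simp [List.count_append]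
  · rw [if_neg hs]
    have hcnt : (p ++ [i]).count s = p.count s := by
      have his : ¬ i = s := fun hh => hs hh.symm
      simp [List.count_append, List.count_cons, his]
    by_cases hqs : y ≤ PySem.Str.len s ∧ PySem.Str.startswith s "O" = true
    · rw [if_pos hqs, if_pos hqs, hcnt]
    · rw [if_neg hqs, if_neg hqs]

lemma hdQ_append_nonqual (y : Int) (p : List String) (i : String)
    (hq : ¬ (y ≤ PySem.Str.len i ∧ PySem.Str.startswith i "O" = true)) :
    hdQ y (p ++ [i]) = hdQ y p := by
  funext s
  unfold hdQ
  by_cases hqs : y ≤ PySem.Str.len s ∧ PySem.Str.startswith s "O" = true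
  · rw [if_pos hqs, if_pos hqs]
    have his : ¬ i = s := fun hh => hq (hh ▸ hqs)
    simp [List.count_append, List.count_cons, his]
  · rw [if_neg hqs, if_neg hqs]

-- the simulation invariant: A's test list is the prefix with every qualifying element
-- blanked, and A's counter is B's comprehension over the prefix
def SimInv (y : Int) (p : List String) (st : List String × List Int) : Prop :=
  st.1 = maskL p (hdQ y p) ∧
  st.2 = ((PySem.List.enumerate p 0).filter
      (fun q => decide (y ≤ PySem.Str.len q.2 ∧ PySem.Str.startswith q.2 "O" = true))).map
    (fun q => q.1 + 1)

lemma SimInv_step (y : Int) (p : List String) (st : List String × List Int) (i : String)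
    (h : SimInv y p st) :
    SimInv y (p ++ [i]) (tablenStepA y st i) := by
  obtain ⟨test0, cA⟩ := st
  obtain ⟨h1, h2⟩ := h
  simp only at h1 h2
  subst h1 h2
  have henum : (PySem.List.enumerate (p ++ [i]) 0).filter
      (fun q => decide (y ≤ PySem.Str.len q.2 ∧ PySem.Str.startswith q.2 "O" = true)) =
      (PySem.List.enumerate p 0).filter
        (fun q => decide (y ≤ PySem.Str.len q.2 ∧ PySem.Str.startswith q.2 "O" = true)) ++
      (if y ≤ PySem.Str.len i ∧ PySem.Str.startswith i "O" = true
        then [((p.length : Int), i)] else []) := by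
    rw [PySem.List.enumerate_append, List.filter_append]
    congr 1
    simp only [PySem.List.enumerate_cons, PySem.List.enumerate_nil, zero_add]
    simp only [List.filter_cons, List.filter_nil, decide_eq_true_eq]
  unfold tablenStepA
  simp only
  by_cases hq : pvQual y i
  · -- qualifying element: A consumes the element it just appended
    have hq' : y ≤ PySem.Str.len i ∧ PySem.Str.startswith i "O" = true := hq
    have hz : i ≠ " " := pvQual_ne_space hq
    have hidx := index?_mask p (hdQ y p) i hz
    have hfull : pick p (hdQ y p) i = p.length :=
      pick_full p (hdQ y p) i (by unfold hdQ; rw [if_pos hq'])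
    have hle : hdQ y p i ≤ p.count i := by unfold hdQ; rw [if_pos hq']
    have hrem := insert_remove (maskL p (hdQ y p) ++ [i]) i (pick p (hdQ y p) i) hz hidx
    rw [if_pos ((condA_iff y i).mpr hq)]
    rw [hidx]
    dsimp only
    rw [hrem]
    dsimp only
    constructor
    · rw [hdQ_append_qual y p i hq']
      exact (maskL_consume p (hdQ y p) i hle).symm
    · rw [henum, if_pos hq', List.map_append, hfull]
      rfl
  · -- non-qualifying element: both sides skip it
    have hq' : ¬ (y ≤ PySem.Str.len i ∧ PySem.Str.startswith i "O" = true) := hq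
    have hz : hdQ y p i = 0 := by unfold hdQ; rw [if_neg hq']
    rw [if_neg (fun hx => hq ((condA_iff y i).mp hx))]
    constructor
    · rw [hdQ_append_nonqual y p i hq']
      exact (maskL_append_zero p (hdQ y p) i hz).symm
    · rw [henum, if_neg hq']
      simp

lemma SimInv_fold (y : Int) (x : List String) :
    SimInv y x (x.foldl (tablenStepA y) ([], [])) := by
  induction x using List.reverseRecOn with
  | nil => exact ⟨rfl, rfl⟩
  | append_singleton p i ih =>
      rw [List.foldl_append, List.foldl_cons, List.foldl_nil]
      exact SimInv_step y p _ i ih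

-- ===== VERDICT (by name: the statement is the Claim_ definition above) =====
theorem tablen_spec : Claim_equal_tablen := by
  intro x y _ _
  show tablen x y = tablen_alt x y
  exact (SimInv_fold y x).2
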